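-- pv_equiv track=rewrite | github.com/Kangsan-Jeon/AlgorithmTrain | Baekjoon/동적 프로그래밍/[완]11052_카드 구매하기.py | solve
-- ===== SOURCE A (Python) =====
-- def solve(N, packs):
--     '''
--     table[1] = P1
--     table[2] = min(P2, P(2-1) + P(1))
--     table[3] = min(P3, P1 + P2, P2 + P1) => 뒤에 두개는 같은 것이므로 앞에 것만 고려
--     table[4] = min(P4, P1 + P3, P2 + P2)
--     table[5] = min(P5, P1 + P4, P2 + P3)
--     '''
--     table = [0]*(N+1)
--     for i in range(1, N+1):
--         temp = [packs[i-1]]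
--         for j in range(i//2):
--             temp.append(table[i-j-1] + table[j+1])
--         table[i] = max(temp)
--     return table[N]
-- ===== SOURCE B (Python) =====
-- def solve(N, packs):
--     # bottom-up unbounded-knapsack DP: dp[i] = best price for exactly i cards,
--     # dp[i] = max over pack size k of packs[k-1] + dp[i-k], with a running max
--     dp = [0]
--     for i in range(1, N + 1):
--         best = packs[0] + dp[i - 1]
--         for k in range(2, i + 1):
--             best = max(best, packs[k - 1] + dp[i - k])
--         dp.append(best)
--     return dp[N]
-- ===== Notes on version B (the rewrite author's own statement) =====
-- stated objective: idiomatic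
-- what changed: Replaces A's half-range recurrence (temp list of sums of two previously computed table entries over j < i//2, then max(temp)) by the standard unbounded-knapsack DP: dp built by appending, with a running max over all pack sizes k of packs[k-1] + dp[i-k].
import Mathlib
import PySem

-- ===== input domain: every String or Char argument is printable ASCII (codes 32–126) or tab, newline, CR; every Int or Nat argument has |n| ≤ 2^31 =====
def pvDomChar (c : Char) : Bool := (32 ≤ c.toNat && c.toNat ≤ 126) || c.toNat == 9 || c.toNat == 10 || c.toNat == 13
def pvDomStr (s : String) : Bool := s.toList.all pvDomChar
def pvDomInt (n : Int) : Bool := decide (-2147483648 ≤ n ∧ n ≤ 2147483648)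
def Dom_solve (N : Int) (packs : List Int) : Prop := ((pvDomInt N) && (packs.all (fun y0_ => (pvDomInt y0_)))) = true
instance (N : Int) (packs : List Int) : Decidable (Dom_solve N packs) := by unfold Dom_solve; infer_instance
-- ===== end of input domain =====

-- B replaces A's half-range split (combining two table entries) by the standard
-- unbounded-knapsack recurrence (one pack price plus one table entry) with a running max;
-- objective: idiomatic / alternative decomposition, same O(N^2) cost.

-- ===== PORT A =====
-- table[i-1], table[j+1], packs[i-1] are in range for every input Pre_solve admits,
-- so pyGetD with default 0 is exact there; pySetD likewise.
def solve (N : Int) (packs : List Int) : Int :=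
  let table0 : List Int := List.replicate (N + 1).toNat 0      -- [0]*(N+1)
  let table :=
    (PySem.List.pyRange 1 (N + 1)).foldl (fun table i =>
      let temp : List Int := [PySem.List.pyGetD packs (i - 1) 0]
      let temp :=
        (PySem.List.pyRange 0 (PySem.Int.floordiv i 2)).foldl
          (fun temp j =>
            temp ++ [PySem.List.pyGetD table (i - j - 1) 0 + PySem.List.pyGetD table (j + 1) 0])
          temp
      PySem.List.pySetD table i ((PySem.List.max? temp (fun x => x)).getD 0))
      table0
  PySem.List.pyGetD table N 0

-- ===== PORT B =====
def solve_alt (N : Int) (packs : List Int) : Int :=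
  let dp :=
    (PySem.List.pyRange 1 (N + 1)).foldl (fun dp i =>
      let best := PySem.List.pyGetD packs 0 0 + PySem.List.pyGetD dp (i - 1) 0
      let best :=
        (PySem.List.pyRange 2 (i + 1)).foldl
          (fun best k =>
            max best (PySem.List.pyGetD packs (k - 1) 0 + PySem.List.pyGetD dp (i - k) 0))
          best
      dp ++ [best]) [0]
  PySem.List.pyGetD dp N 0

-- ===== PRECONDITION & SPEC =====
-- Exactly the inputs on which the Python A returns: for N < 0 it hits table[N] on a
-- too-short table (IndexError), and for N > len(packs) it hits packs[i-1] out of range.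
def Pre_solve (N : Int) (packs : List Int) : Prop := 0 ≤ N ∧ N ≤ packs.length
instance (N : Int) (packs : List Int) : Decidable (Pre_solve N packs) := by
  unfold Pre_solve; infer_instance

def pvWitness_solve : Int × List Int := (4, [1, 5, 6, 7])

def Spec_solve (N : Int) (packs : List Int) (out : Int) : Prop := out = solve_alt N packs
instance (N : Int) (packs : List Int) (out : Int) : Decidable (Spec_solve N packs out) := by
  unfold Spec_solve; infer_instance

-- ===== CLAIM (what is proved, stated in full; the proofs are below) =====
def Claim_equal_solve : Prop := ∀ (N : Int) (packs : List Int), Dom_solve N packs → Pre_solve N packs → Spec_solve N packs (solve N packs)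

-- ===== LEMMAS AND PROOFS =====

-- Functional model of A's table: tblA p m = the first m+1 entries of A's table.
def tblA (p : List Int) : Nat → List Int
  | 0 => [0]
  | m + 1 =>
    tblA p m ++
      [(List.range ((m + 1) / 2)).foldl
        (fun b j => max b ((tblA p m).getD (m - j) 0 + (tblA p m).getD (j + 1) 0))
        (p.getD m 0)]

-- Functional model of B's dp list.
def tblB (p : List Int) : Nat → List Int
  | 0 => [0]
  | m + 1 =>
    tblB p m ++
      [(List.range m).foldl
        (fun b k => max b (p.getD (k + 1) 0 + (tblB p m).getD (m - 1 - k) 0))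
        (p.getD 0 0 + (tblB p m).getD m 0)]

def FA (p : List Int) (i : Nat) : Int := (tblA p i).getD i 0
def FB (p : List Int) (i : Nat) : Int := (tblB p i).getD i 0

lemma len_tblA (p : List Int) (m : Nat) : (tblA p m).length = m + 1 := by
  induction m with
  | zero => rfl
  | succ m ih => simp [tblA, ih]

lemma len_tblB (p : List Int) (m : Nat) : (tblB p m).length = m + 1 := by
  induction m with
  | zero => rfl
  | succ m ih => simp [tblB, ih]

lemma tblA_getD (p : List Int) {m j : Nat} (h : j ≤ m) : (tblA p m).getD j 0 = FA p j := by
  induction m with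
  | zero =>
    obtain rfl : j = 0 := by omega
    rfl
  | succ m ih =>
    rcases Nat.lt_or_ge j (m + 1) with hj | hj
    · rw [tblA, List.getD_append _ _ _ _ (by rw [len_tblA]; omega)]
      exact ih (by omega)
    · have : j = m + 1 := by omega
      subst this; rfl

lemma tblB_getD (p : List Int) {m j : Nat} (h : j ≤ m) : (tblB p m).getD j 0 = FB p j := by
  induction m with
  | zero =>
    obtain rfl : j = 0 := by omega
    rfl
  | succ m ih =>
    rcases Nat.lt_or_ge j (m + 1) with hj | hj
    · rw [tblB, List.getD_append _ _ _ _ (by rw [len_tblB]; omega)]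
      exact ih (by omega)
    · have : j = m + 1 := by omega
      subst this; rfl

lemma getD_append_len {xs : List Int} {v : Int} {n : Nat} (h : xs.length = n) :
    (xs ++ [v]).getD n 0 = v := by
  subst h; simp [List.getD_eq_getElem?_getD]

-- fused foldl-max facts
lemma fm_ge_init {α : Type} (g : α → Int) (L : List α) (a : Int) :
    a ≤ L.foldl (fun b k => max b (g k)) a := by
  have := (PySem.List.le_foldl_max (L.map g) a).1
  rwa [List.foldl_map] at this

lemma fm_ge_mem {α : Type} (g : α → Int) {L : List α} (a : Int) {x : α} (hx : x ∈ L) :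
    g x ≤ L.foldl (fun b k => max b (g k)) a := by
  have := (PySem.List.le_foldl_max (L.map g) a).2 (g x) (List.mem_map_of_mem hx)
  rwa [List.foldl_map] at this

lemma fm_le {α : Type} (g : α → Int) (L : List α) {a c : Int} (ha : a ≤ c)
    (hm : ∀ x ∈ L, g x ≤ c) : L.foldl (fun b k => max b (g k)) a ≤ c := by
  induction L generalizing a with
  | nil => exact ha
  | cons x L ih =>
    exact ih (max_le ha (hm x (by simp))) (fun y hy => hm y (by simp [hy]))

lemma fm_cases {α : Type} (g : α → Int) (L : List α) (a : Int) :
    L.foldl (fun b k => max b (g k)) a = a ∨ ∃ x ∈ L, L.foldl (fun b k => max b (g k)) a = g x := by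
  induction L generalizing a with
  | nil => exact Or.inl rfl
  | cons x L ih =>
    simp only [List.foldl_cons]
    rcases ih (max a (g x)) with h | ⟨y, hy, h⟩
    · rcases max_choice a (g x) with hc | hc
      · exact Or.inl (by rw [h, hc])
      · exact Or.inr ⟨x, by simp, by rw [h, hc]⟩
    · exact Or.inr ⟨y, by simp [hy], h⟩

lemma FB_zero (p : List Int) : FB p 0 = 0 := rfl

lemma FB_succ (p : List Int) (m : Nat) :
    FB p (m + 1) =
      (List.range m).foldl (fun b k => max b (p.getD (k + 1) 0 + FB p (m - 1 - k)))
        (p.getD 0 0 + FB p m) := by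
  unfold FB
  rw [tblB, getD_append_len (len_tblB p m)]
  rw [tblB_getD p (le_refl m)]
  exact PySem.List.foldl_congr_mem _ _ _ _ (by
    intro acc k hk
    rw [tblB_getD p (by omega : m - 1 - k ≤ m)]
    rfl)

lemma FA_succ (p : List Int) (m : Nat) :
    FA p (m + 1) =
      (List.range ((m + 1) / 2)).foldl (fun b j => max b (FA p (m - j) + FA p (j + 1)))
        (p.getD m 0) := by
  unfold FA
  rw [tblA, getD_append_len (len_tblA p m)]
  exact PySem.List.foldl_congr_mem _ _ _ _ (by
    intro acc j hj
    have hj' : j < (m + 1) / 2 := List.mem_range.mp hj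
    rw [tblA_getD p (by omega : m - j ≤ m), tblA_getD p (by omega : j + 1 ≤ m)]
    rfl)

-- every single pack choice is a lower bound for FB
lemma FB_bound (p : List Int) {m k : Nat} (h1 : 1 ≤ k) (h2 : k ≤ m) :
    p.getD (k - 1) 0 + FB p (m - k) ≤ FB p m := by
  obtain ⟨m', rfl⟩ : ∃ m', m = m' + 1 := ⟨m - 1, by omega⟩
  rw [FB_succ]
  rcases Nat.lt_or_ge k 2 with hk | hk
  · have : k = 1 := by omega
    subst this
    simpa using fm_ge_init _ (List.range m') (p.getD 0 0 + FB p m')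
  · obtain ⟨kk, rfl⟩ : ∃ kk, k = kk + 2 := ⟨k - 2, by omega⟩
    have hmem : kk ∈ List.range m' := List.mem_range.mpr (by omega)
    have := fm_ge_mem (fun k => p.getD (k + 1) 0 + FB p (m' - 1 - k))
      (p.getD 0 0 + FB p m') hmem
    have e1 : kk + 2 - 1 = kk + 1 := by omega
    have e2 : m' + 1 - (kk + 2) = m' - 1 - kk := by omega
    rw [e1, e2]
    exact this

-- FB m is achieved by some single pack choice
lemma FB_achieved (p : List Int) {m : Nat} (hm : 1 ≤ m) :
    ∃ k, 1 ≤ k ∧ k ≤ m ∧ FB p m = p.getD (k - 1) 0 + FB p (m - k) := by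
  obtain ⟨m', rfl⟩ : ∃ m', m = m' + 1 := ⟨m - 1, by omega⟩
  rw [FB_succ]
  rcases fm_cases (fun k => p.getD (k + 1) 0 + FB p (m' - 1 - k))
      (List.range m') (p.getD 0 0 + FB p m') with h | ⟨kk, hkk, h⟩
  · exact ⟨1, by omega, by omega, by simpa using h⟩
  · have hkk' : kk < m' := List.mem_range.mp hkk
    refine ⟨kk + 2, by omega, by omega, ?_⟩
    have e1 : kk + 2 - 1 = kk + 1 := by omega
    have e2 : m' + 1 - (kk + 2) = m' - 1 - kk := by omega
    rw [e1, e2]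
    exact h

lemma FB_superadd (p : List Int) : ∀ a b : Nat, FB p a + FB p b ≤ FB p (a + b) := by
  intro a
  induction a using Nat.strong_induction_on with
  | _ a ih =>
    intro b
    rcases Nat.eq_zero_or_pos a with rfl | ha
    · simp [FB_zero]
    · obtain ⟨k, hk1, hk2, hk⟩ := FB_achieved p ha
      calc FB p a + FB p b = p.getD (k - 1) 0 + (FB p (a - k) + FB p b) := by rw [hk]; ring
        _ ≤ p.getD (k - 1) 0 + FB p (a - k + b) := by
              exact add_le_add le_rfl (ih (a - k) (by omega) b)
        _ ≤ FB p (a + b) := by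
              have e : a - k + b = a + b - k := by omega
              rw [e]
              exact FB_bound p hk1 (by omega)

lemma FA_eq_FB (p : List Int) : ∀ m, FA p m = FB p m := by
  intro m
  induction m using Nat.strong_induction_on with
  | _ m ih =>
    rcases Nat.eq_zero_or_pos m with rfl | hm
    · rfl
    · obtain ⟨m', rfl⟩ : ∃ m', m = m' + 1 := ⟨m - 1, by omega⟩
      rw [FA_succ]
      have hcongr :
          (List.range ((m' + 1) / 2)).foldl (fun b j => max b (FA p (m' - j) + FA p (j + 1)))
            (p.getD m' 0)
          = (List.range ((m' + 1) / 2)).foldl (fun b j => max b (FB p (m' - j) + FB p (j + 1)))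
            (p.getD m' 0) := by
        refine PySem.List.foldl_congr_mem _ _ _ _ ?_
        intro acc j hj
        have hj' : j < (m' + 1) / 2 := List.mem_range.mp hj
        rw [ih (m' - j) (by omega), ih (j + 1) (by omega)]
      rw [hcongr]
      apply le_antisymm
      · -- every term of A's fold is ≤ FB (m'+1)
        apply fm_le
        · have := FB_bound p (k := m' + 1) (m := m' + 1) (by omega) (by omega)
          simpa [FB_zero] using this
        · intro j hj
          have hj' : j < (m' + 1) / 2 := List.mem_range.mp hj
          have := FB_superadd p (m' - j) (j + 1)
          have e : m' - j + (j + 1) = m' + 1 := by omega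
          rwa [e] at this
      · -- FB (m'+1) is one of A's terms (or the init)
        obtain ⟨k, hk1, hk2, hk⟩ := FB_achieved p (by omega : 1 ≤ m' + 1)
        rcases Nat.lt_or_ge k (m' + 1) with hklt | hkge
        · have hpk : p.getD (k - 1) 0 ≤ FB p k := by
            have := FB_bound p (m := k) hk1 (le_refl k)
            simpa [FB_zero] using this
          have hle : FB p (m' + 1) ≤ FB p k + FB p (m' + 1 - k) :=
            hk ▸ add_le_add hpk le_rfl
          rcases Nat.le_total k (m' + 1 - k) with hmin | hmin
          · have hmem : k - 1 ∈ List.range ((m' + 1) / 2) := List.mem_range.mpr (by omega)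
            have := fm_ge_mem (fun j => FB p (m' - j) + FB p (j + 1)) (p.getD m' 0) hmem
            have e1 : m' - (k - 1) = m' + 1 - k := by omega
            have e2 : k - 1 + 1 = k := by omega
            simp only [e1, e2] at this
            calc FB p (m' + 1) ≤ FB p k + FB p (m' + 1 - k) := hle
              _ = FB p (m' + 1 - k) + FB p k := by ring
              _ ≤ _ := this
          · have hmem : m' - k ∈ List.range ((m' + 1) / 2) := List.mem_range.mpr (by omega)
            have := fm_ge_mem (fun j => FB p (m' - j) + FB p (j + 1)) (p.getD m' 0) hmem
            have e1 : m' - (m' - k) = k := by omega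
            have e2 : m' - k + 1 = m' + 1 - k := by omega
            simp only [e1, e2] at this
            exact le_trans hle this
        · have hkeq : k = m' + 1 := by omega
          subst hkeq
          have : FB p (m' + 1) = p.getD m' 0 := by simpa [FB_zero] using hk
          rw [this]
          exact fm_ge_init _ _ _

-- Python's max(list) as a foldl
lemma max?_cons_getD (x : Int) (L : List Int) (d : Int) :
    (PySem.List.max? (x :: L) (fun a => a)).getD d = L.foldl max x := by
  induction L generalizing x with
  | nil => rfl
  | cons y L ih =>
    have step : PySem.List.max? (x :: y :: L) (fun a : Int => a)
        = PySem.List.max? (max x y :: L) (fun a : Int => a) := by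
      simp only [PySem.List.max?, List.foldl_cons]
      congr 1
      rcases lt_or_ge x y with h | h
      · rw [if_pos h, max_eq_right h.le]
      · rw [if_neg (not_lt.mpr h), max_eq_left h]
    rw [step, ih, List.foldl_cons]

-- the loop of A builds tblA, padded with zeros
lemma loopA (p : List Int) (n : Nat) : ∀ m, m ≤ n →
    (PySem.List.pyRange 1 ((m : Int) + 1)).foldl (fun table i =>
      PySem.List.pySetD table i
        ((PySem.List.max?
            ((PySem.List.pyRange 0 (PySem.Int.floordiv i 2)).foldl
              (fun temp j =>
                temp ++ [PySem.List.pyGetD table (i - j - 1) 0 + PySem.List.pyGetD table (j + 1) 0])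
              [PySem.List.pyGetD p (i - 1) 0])
            (fun x => x)).getD 0))
      (List.replicate (n + 1) (0 : Int))
    = tblA p m ++ List.replicate (n - m) 0 := by
  intro m
  induction m with
  | zero =>
    intro _
    rw [PySem.List.pyRange_one_eq_nil (by norm_num)]
    simp [tblA, List.replicate_succ]
  | succ m ih =>
    intro hm
    have e : ((m + 1 : Nat) : Int) + 1 = ((m : Int) + 1) + 1 := by push_cast; ring
    rw [e, PySem.List.pyRange_one_succ_right (by omega), List.foldl_append, ih (by omega)]
    set T := tblA p m ++ List.replicate (n - m) (0 : Int) with hT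
    simp only [List.foldl_cons, List.foldl_nil]
    have ei1 : ((m : Int) + 1 - 1) = (m : Int) := by ring
    have ediv : PySem.Int.floordiv ((m : Int) + 1) 2 = (((m + 1) / 2 : Nat) : Int) := by
      rw [show ((m : Int) + 1) = ((m + 1 : Nat) : Int) from by push_cast; ring]
      exact_mod_cast PySem.Int.floordiv_natCast (m + 1) 2
    rw [ei1, ediv, PySem.List.pyGetD_natCast, PySem.List.pyRange_zero_nat, List.foldl_map,
      PySem.List.foldl_append_singleton_eq_map, List.singleton_append]
    have hmap : (List.range ((m + 1) / 2)).map
        (fun (y : Nat) => PySem.List.pyGetD T ((m : Int) + 1 - (y : Int) - 1) 0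
          + PySem.List.pyGetD T ((y : Int) + 1) 0)
        = (List.range ((m + 1) / 2)).map
        (fun j => (tblA p m).getD (m - j) 0 + (tblA p m).getD (j + 1) 0) := by
      refine List.map_congr_left ?_
      intro j hj
      have hj' : j < (m + 1) / 2 := List.mem_range.mp hj
      have c1 : ((m : Int) + 1 - (j : Int) - 1) = ((m - j : Nat) : Int) := by
        push_cast [Nat.cast_sub (by omega : j ≤ m)]; ring
      have c2 : ((j : Int) + 1) = ((j + 1 : Nat) : Int) := by push_cast; ring
      rw [c1, c2, hT, PySem.List.pyGetD_natCast, PySem.List.pyGetD_natCast,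
        List.getD_append _ _ _ _ (by rw [len_tblA]; omega),
        List.getD_append _ _ _ _ (by rw [len_tblA]; omega)]
    rw [hmap, max?_cons_getD, ← List.foldl_map,
      show ((m : Int) + 1) = ((m + 1 : Nat) : Int) from by push_cast; ring,
      PySem.List.pySetD_natCast, hT, List.set_append, if_neg (by rw [len_tblA]; omega)]
    rw [len_tblA, show m + 1 - (m + 1) = 0 from by omega,
      show n - m = (n - (m + 1)) + 1 from by omega, List.replicate_succ, List.set_cons_zero]
    show tblA p m ++ _ :: List.replicate (n - (m + 1)) 0 = tblA p (m + 1) ++ _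
    rw [tblA]
    simp [List.foldl_map]

-- the loop of B builds tblB
lemma loopB (p : List Int) : ∀ m : Nat,
    (PySem.List.pyRange 1 ((m : Int) + 1)).foldl (fun dp i =>
      dp ++ [(PySem.List.pyRange 2 (i + 1)).foldl
        (fun best k =>
          max best (PySem.List.pyGetD p (k - 1) 0 + PySem.List.pyGetD dp (i - k) 0))
        (PySem.List.pyGetD p 0 0 + PySem.List.pyGetD dp (i - 1) 0)])
      [(0 : Int)]
    = tblB p m := by
  intro m
  induction m with
  | zero =>
    rw [PySem.List.pyRange_one_eq_nil (by norm_num)]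
    rfl
  | succ m ih =>
    have e : ((m + 1 : Nat) : Int) + 1 = ((m : Int) + 1) + 1 := by push_cast; ring
    rw [e, PySem.List.pyRange_one_succ_right (by omega), List.foldl_append, ih]
    simp only [List.foldl_cons, List.foldl_nil]
    have ei1 : ((m : Int) + 1 - 1) = (m : Int) := by ring
    rw [ei1]
    simp only [PySem.List.pyRange_one, List.foldl_map, PySem.List.pyGetD_zero,
      PySem.List.pyGetD_natCast]
    rw [show (((m : Int) + 1 + 1) - 2).toNat = m from by omega]
    have hcongr : ∀ (f : Int → Nat → Int),
        (∀ acc (k : Nat), k ∈ List.range m → f acc k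
          = max acc (p.getD (k + 1) 0 + (tblB p m).getD (m - 1 - k) 0)) →
        (List.range m).foldl f (p.getD 0 0 + (tblB p m).getD m 0)
        = (List.range m).foldl
          (fun best k => max best (p.getD (k + 1) 0 + (tblB p m).getD (m - 1 - k) 0))
          (p.getD 0 0 + (tblB p m).getD m 0) :=
      fun f hf => PySem.List.foldl_congr_mem _ _ _ _ hf
    rw [hcongr _ ?_]
    · rfl
    · intro acc k hk
      have hk' : k < m := List.mem_range.mp hk
      have c1 : (2 + (k : Int) - 1) = ((k + 1 : Nat) : Int) := by push_cast; ring
      have c2 : ((m : Int) + 1 - (2 + (k : Int))) = ((m - 1 - k : Nat) : Int) := by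
        push_cast [Nat.cast_sub (by omega : k ≤ m - 1), Nat.cast_sub (by omega : 1 ≤ m)]
        ring
      rw [c1, c2, PySem.List.pyGetD_natCast, PySem.List.pyGetD_natCast]

lemma solveA_eq (p : List Int) (n : Nat) : solve (n : Int) p = FA p n := by
  simp only [solve]
  rw [show ((n : Int) + 1).toNat = n + 1 from by omega, loopA p n n (le_refl n)]
  rw [Nat.sub_self, List.replicate_zero, List.append_nil, PySem.List.pyGetD_natCast]
  rfl

lemma solveB_eq (p : List Int) (n : Nat) : solve_alt (n : Int) p = FB p n := by
  simp only [solve_alt]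
  rw [loopB p n, PySem.List.pyGetD_natCast]
  rfl

-- ===== VERDICT (by name: the statement is the Claim_ definition above) =====
theorem solve_spec : Claim_equal_solve := by
  intro N packs _hdom hpre
  unfold Spec_solve
  obtain ⟨h0, _⟩ := hpre
  obtain ⟨n, rfl⟩ : ∃ n : Nat, N = (n : Int) := ⟨N.toNat, by omega⟩
  rw [solveA_eq, solveB_eq, FA_eq_FB]
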